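-- pv_equiv track=rewrite | github.com/rafgia/temporal-graph-segmentation | auxiliary.py | compute_a_auxiliary_structure
-- ===== SOURCE A (Python) =====
-- def compute_a_auxiliary_structure(nedges,ntimestamps,timestamp2edges):
--   prev = [0]*nedges
--   a_aux = []
--   for t in range(ntimestamps):
--     for e in timestamp2edges[t]:
--       prev[e] = prev[e] + 1
--     a_aux.append(prev)
--     prev = prev.copy()
--
--   return a_aux
-- ===== SOURCE B (Python) =====
-- def compute_a_auxiliary_structure(nedges, ntimestamps, timestamp2edges):
--     # Pass 1: per-timestamp increment vectors (duplicates each count).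
--     increments = []
--     for t in range(ntimestamps):
--         inc = [0] * nedges
--         for e in timestamp2edges[t]:
--             inc[e] += 1
--         increments.append(inc)
--     # Pass 2: running elementwise prefix sums, each snapshot a fresh list.
--     out = []
--     total = [0] * nedges
--     for inc in increments:
--         total = [x + y for x, y in zip(total, inc)]
--         out.append(total)
--     return out
-- ===== Notes on version B (the rewrite author's own statement) =====
-- stated objective: alternative
-- what changed: B separates the single mutate-and-append loop of A into two passes: first build per-timestamp increment vectors, then compute elementwise running prefix sums, each snapshot a fresh list built by zip.
import Mathlib
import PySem

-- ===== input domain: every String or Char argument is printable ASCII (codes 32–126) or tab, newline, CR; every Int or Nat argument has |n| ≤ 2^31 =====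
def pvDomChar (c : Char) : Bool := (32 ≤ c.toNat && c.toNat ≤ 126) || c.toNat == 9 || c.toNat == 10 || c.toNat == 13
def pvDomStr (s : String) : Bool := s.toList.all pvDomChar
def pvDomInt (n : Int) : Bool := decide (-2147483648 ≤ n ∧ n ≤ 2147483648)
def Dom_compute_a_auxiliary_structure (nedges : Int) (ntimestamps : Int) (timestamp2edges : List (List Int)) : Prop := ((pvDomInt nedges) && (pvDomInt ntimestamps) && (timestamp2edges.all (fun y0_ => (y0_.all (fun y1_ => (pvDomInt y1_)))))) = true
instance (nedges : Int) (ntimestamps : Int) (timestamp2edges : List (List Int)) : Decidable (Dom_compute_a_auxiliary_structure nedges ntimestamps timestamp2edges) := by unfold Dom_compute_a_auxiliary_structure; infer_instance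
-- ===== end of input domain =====

-- B: two passes (per-timestamp increment vectors, then elementwise prefix sums) instead of A's single mutate-and-append loop; alternative decomposition, same cost.

-- ===== PORT A =====
-- prev[e] = prev[e] + 1  (negative e from the end; Pre_ keeps every index in range)
def pvBump (p : List Int) (e : Int) : List Int :=
  PySem.List.pySetD p e (PySem.List.pyGetD p e 0 + 1)

def compute_a_auxiliary_structure (nedges : Int) (ntimestamps : Int) (timestamp2edges : List (List Int)) : List (List Int) :=
  -- prev = [0]*nedges; for t in range(ntimestamps): for e in ...[t]: prev[e]+=1; append prev; prev = prev.copy()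
  ((PySem.List.pyRange 0 ntimestamps 1).foldl
    (fun (st : List (List Int) × List Int) (t : Int) =>
      let prev' := (PySem.List.pyGetD timestamp2edges t []).foldl pvBump st.2
      (st.1 ++ [prev'], prev'))
    ([], List.replicate nedges.toNat 0)).1

-- ===== PORT B =====
-- total = [x+y for x,y in zip(total, inc)]
def pvAddVec (a b : List Int) : List Int := (a.zip b).map (fun p => p.1 + p.2)

def compute_a_auxiliary_structure_alt (nedges : Int) (ntimestamps : Int) (timestamp2edges : List (List Int)) : List (List Int) :=
  let increments := (PySem.List.pyRange 0 ntimestamps 1).map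
    (fun t => (PySem.List.pyGetD timestamp2edges t []).foldl pvBump (List.replicate nedges.toNat 0))
  (increments.foldl
    (fun (st : List (List Int) × List Int) (inc : List Int) =>
      let total := pvAddVec st.2 inc
      (st.1 ++ [total], total))
    ([], List.replicate nedges.toNat 0)).1

-- ===== PRECONDITION & SPEC =====
-- Pre_ = exactly where Python A returns: each accessed timestamp index and each edge index is in range (no IndexError).
def Pre_compute_a_auxiliary_structure (nedges : Int) (ntimestamps : Int) (timestamp2edges : List (List Int)) : Prop :=
  ntimestamps ≤ (timestamp2edges.length : Int) ∧
  ∀ l ∈ timestamp2edges.take ntimestamps.toNat, ∀ e ∈ l, PySem.Raise.InRange nedges.toNat e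
instance (nedges : Int) (ntimestamps : Int) (timestamp2edges : List (List Int)) : Decidable (Pre_compute_a_auxiliary_structure nedges ntimestamps timestamp2edges) := by unfold Pre_compute_a_auxiliary_structure; infer_instance

def pvWitness_compute_a_auxiliary_structure : Int × Int × List (List Int) := (3, 2, [[0, 2, 0], [1]])

def Spec_compute_a_auxiliary_structure (nedges : Int) (ntimestamps : Int) (timestamp2edges : List (List Int)) (out : List (List Int)) : Prop := out = compute_a_auxiliary_structure_alt nedges ntimestamps timestamp2edges
instance (nedges : Int) (ntimestamps : Int) (timestamp2edges : List (List Int)) (out : List (List Int)) : Decidable (Spec_compute_a_auxiliary_structure nedges ntimestamps timestamp2edges out) := by unfold Spec_compute_a_auxiliary_structure; infer_instance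

-- ===== CLAIM (what is proved, stated in full; the proofs are below) =====
def Claim_equal_compute_a_auxiliary_structure : Prop := ∀ (nedges : Int) (ntimestamps : Int) (timestamp2edges : List (List Int)), Dom_compute_a_auxiliary_structure nedges ntimestamps timestamp2edges → Pre_compute_a_auxiliary_structure nedges ntimestamps timestamp2edges → Spec_compute_a_auxiliary_structure nedges ntimestamps timestamp2edges (compute_a_auxiliary_structure nedges ntimestamps timestamp2edges)

-- ===== LEMMAS AND PROOFS =====

theorem pv_witness_ok :
    Dom_compute_a_auxiliary_structure pvWitness_compute_a_auxiliary_structure.1 pvWitness_compute_a_auxiliary_structure.2.1 pvWitness_compute_a_auxiliary_structure.2.2 ∧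
    Pre_compute_a_auxiliary_structure pvWitness_compute_a_auxiliary_structure.1 pvWitness_compute_a_auxiliary_structure.2.1 pvWitness_compute_a_auxiliary_structure.2.2 := by
  decide

theorem length_pvBump (p : List Int) (e : Int) : (pvBump p e).length = p.length := by
  simp [pvBump, PySem.List.length_pySetD]

theorem length_fold_pvBump (es : List Int) (p : List Int) :
    (es.foldl pvBump p).length = p.length := by
  induction es generalizing p with
  | nil => rfl
  | cons e es ih => simp [List.foldl, ih, length_pvBump]

theorem length_pvAddVec (a b : List Int) : (pvAddVec a b).length = min a.length b.length := by
  simp [pvAddVec]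

theorem pvAddVec_zero (p : List Int) (n : Nat) (h : p.length = n) :
    pvAddVec p (List.replicate n 0) = p := by
  apply List.ext_getElem <;> simp [pvAddVec, h]

theorem pvBump_addVec (p q : List Int) (e : Int) (h : p.length = q.length)
    (he : PySem.Raise.InRange q.length e) :
    pvBump (pvAddVec p q) e = pvAddVec p (pvBump q e) := by
  obtain ⟨h1, h2⟩ := he
  obtain ⟨i, hidx, hiq⟩ : ∃ i, PySem.List.pyIdx? q.length e = some i ∧ i < q.length := by
    rcases lt_or_ge e 0 with hneg | hpos
    · refine ⟨q.length - (-e).toNat, ?_, by omega⟩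
      unfold PySem.List.pyIdx?
      rw [if_neg (by omega), if_pos (by omega)]
    · refine ⟨e.toNat, ?_, by omega⟩
      unfold PySem.List.pyIdx?
      rw [if_pos (by omega), if_pos (by omega)]
  have hlen : (pvAddVec p q).length = q.length := by simp [pvAddVec, h]
  have hset : ∀ (r : List Int) (v : Int), r.length = q.length →
      PySem.List.pySetD r e v = r.set i v := by
    intro r v hr
    simp [PySem.List.pySetD, PySem.List.pySet?, hr, hidx]
  have hget : ∀ (r : List Int) (hr : r.length = q.length),
      PySem.List.pyGetD r e 0 = r[i]'(by omega) := by
    intro r hr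
    simp [PySem.List.pyGetD, PySem.List.pyGet?, hr, hidx,
      List.getElem?_eq_getElem (by omega : i < r.length)]
  unfold pvBump
  rw [hset _ _ hlen, hget _ hlen, hset _ _ rfl, hget _ rfl]
  apply List.ext_getElem
  · simp [pvAddVec, h]
  · intro j hj1 hj2
    have hjp : j < p.length := by
      simp [pvAddVec, h] at hj1; omega
    have hjq : j < q.length := by omega
    by_cases hji : j = i
    · subst hji
      simp [pvAddVec, List.getElem_zip, List.getElem_set_self]
      omega
    · rw [List.getElem_set_ne (by omega)]
      simp [pvAddVec, List.getElem_zip]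
      rw [List.getElem_set_ne (by omega)]

theorem fold_pvBump_addVec (es : List Int) (p q : List Int) (h : p.length = q.length)
    (hv : ∀ e ∈ es, PySem.Raise.InRange q.length e) :
    es.foldl pvBump (pvAddVec p q) = pvAddVec p (es.foldl pvBump q) := by
  induction es generalizing q with
  | nil => rfl
  | cons e es ih =>
    simp only [List.foldl]
    rw [pvBump_addVec p q e h (hv e (by simp))]
    exact ih (pvBump q e) (by rw [length_pvBump, h]) (by
      intro x hx; rw [length_pvBump]; exact hv x (by simp [hx]))

-- A's fold over a list of timestamps equals B's fold over the mapped increments,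
-- from any state whose prev has length nedges.toNat, provided every accessed edge is in range.
theorem pv_main (nedges : Int) (timestamp2edges : List (List Int)) (ts : List Int)
    (acc : List (List Int)) (prev : List Int) (hp : prev.length = nedges.toNat)
    (hv : ∀ t ∈ ts, ∀ e ∈ PySem.List.pyGetD timestamp2edges t ([] : List Int),
      PySem.Raise.InRange nedges.toNat e) :
    (ts.foldl
      (fun (st : List (List Int) × List Int) (t : Int) =>
        let prev' := (PySem.List.pyGetD timestamp2edges t []).foldl pvBump st.2
        (st.1 ++ [prev'], prev'))
      (acc, prev)).1 =
    ((ts.map (fun t => (PySem.List.pyGetD timestamp2edges t []).foldl pvBump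
        (List.replicate nedges.toNat 0))).foldl
      (fun (st : List (List Int) × List Int) (inc : List Int) =>
        let total := pvAddVec st.2 inc
        (st.1 ++ [total], total))
      (acc, prev)).1 := by
  induction ts generalizing acc prev with
  | nil => rfl
  | cons t ts ih =>
    simp only [List.map, List.foldl]
    have hkey : (PySem.List.pyGetD timestamp2edges t []).foldl pvBump prev =
        pvAddVec prev ((PySem.List.pyGetD timestamp2edges t []).foldl pvBump
          (List.replicate nedges.toNat 0)) := by
      calc (PySem.List.pyGetD timestamp2edges t []).foldl pvBump prev
          = (PySem.List.pyGetD timestamp2edges t []).foldl pvBump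
              (pvAddVec prev (List.replicate nedges.toNat 0)) := by
            rw [pvAddVec_zero prev _ hp]
        _ = _ := by
            apply fold_pvBump_addVec
            · simp [hp]
            · intro e he
              have := hv t (by simp) e he
              simpa using this
    rw [hkey]
    exact ih _ _ (by simp [length_pvAddVec, length_fold_pvBump, hp])
      (fun t' ht' => hv t' (by simp [ht']))

-- ===== VERDICT (by name: the statement is the Claim_ definition above) =====
theorem compute_a_auxiliary_structure_spec : Claim_equal_compute_a_auxiliary_structure := by
  intro nedges ntimestamps timestamp2edges _ hpre
  obtain ⟨hle, hval⟩ := hpre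
  unfold Spec_compute_a_auxiliary_structure compute_a_auxiliary_structure compute_a_auxiliary_structure_alt
  apply pv_main
  · simp
  · intro t ht e he
    rw [PySem.List.mem_pyRange_one] at ht
    have hlen : t.toNat < timestamp2edges.length := by omega
    have hget : PySem.List.pyGetD timestamp2edges t ([] : List Int) = timestamp2edges[t.toNat] := by
      rw [PySem.List.pyGetD_eq_getElem _ _ ht.1 (by omega)]
    rw [hget] at he
    apply hval timestamp2edges[t.toNat] _ e he
    rw [List.mem_take_iff_getElem]
    exact ⟨t.toNat, by omega, rfl⟩
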